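-- pv_equiv track=rewrite | github.com/kroll42/transmissao | teste.py | biphase_mark_encode
-- ===== SOURCE A (Python) =====
-- from typing import List, Tuple, Dict, Callable
--
-- def biphase_mark_encode(binary_data: List[int]) -> List[int]:
--     """
--     Codificação Biphase Mark:
--     - Sempre há uma transição no meio do intervalo do bit
--     - Bit 1 tem uma transição adicional no início do intervalo
--     - Bit 0 não tem transição adicional
--     """
--     encoded = []
--     level = 0
--
--     for bit in binary_data:
--         if bit == 1:
--             # Transição no início
--             level = 1 - level
--
--         encoded.append(level)
--
--         # Transição no meio (para ambos 0 e 1)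
--         level = 1 - level
--         encoded.append(level)
--
--     return encoded
-- ===== SOURCE B (Python) =====
-- def biphase_mark_encode(binary_data):
--     # Two-phase: first compute each bit's first-half level as a prefix parity,
--     # then emit (level, complement) pairs.
--     firsts = []
--     s = 0
--     for i, bit in enumerate(binary_data):
--         s += 1 if bit == 1 else 0
--         firsts.append((i + s) % 2)
--     return [half for a in firsts for half in (a, 1 - a)]
-- ===== Notes on version B (the rewrite author's own statement) =====
-- stated objective: alternative
-- what changed: Replaces A's interleaved stateful level-toggle loop with a two-phase decomposition: one pass computes each bit's first-half level as a prefix parity (i + running count of 1-bits) mod 2, then a flat comprehension emits each level followed by its complement.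
import Mathlib
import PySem

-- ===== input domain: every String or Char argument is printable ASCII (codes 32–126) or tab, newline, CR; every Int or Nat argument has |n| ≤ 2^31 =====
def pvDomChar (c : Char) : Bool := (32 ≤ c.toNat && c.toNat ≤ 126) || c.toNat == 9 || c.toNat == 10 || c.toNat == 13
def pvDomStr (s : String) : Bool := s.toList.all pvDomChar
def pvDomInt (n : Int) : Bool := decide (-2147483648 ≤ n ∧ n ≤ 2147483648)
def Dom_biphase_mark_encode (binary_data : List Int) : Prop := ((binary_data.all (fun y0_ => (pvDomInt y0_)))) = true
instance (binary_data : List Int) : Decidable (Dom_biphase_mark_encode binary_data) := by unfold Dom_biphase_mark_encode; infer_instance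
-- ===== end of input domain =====

-- B replaces A's interleaved stateful toggle with a two-phase structure (prefix-parity precompute, then pair emission); objective: alternative decomposition, same cost.


-- ===== PORT A =====
-- A: interleaved stateful toggle, appending two symbols per bit.
def pvStepA (st : List Int × Int) (bit : Int) : List Int × Int :=
  let level := if bit == 1 then 1 - st.2 else st.2
  let encoded := st.1 ++ [level]
  let level2 := 1 - level
  (encoded ++ [level2], level2)

def biphase_mark_encode (binary_data : List Int) : List Int :=
  (binary_data.foldl pvStepA ([], 0)).1

-- ===== PORT B =====
-- B: first compute each bit's first-half level as a prefix parity, then emit pairs.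
def pvFirstsAux (binary_data : List Int) (i s : Int) : List Int :=
  match binary_data with
  | [] => []
  | bit :: rest =>
    let s' := s + (if bit == 1 then 1 else 0)
    PySem.Int.mod (i + s') 2 :: pvFirstsAux rest (i + 1) s'

def biphase_mark_encode_alt (binary_data : List Int) : List Int :=
  (pvFirstsAux binary_data 0 0).flatMap (fun a => [a, 1 - a])

-- ===== PRECONDITION & SPEC =====
def Spec_biphase_mark_encode (binary_data : List Int) (out : List Int) : Prop := out = biphase_mark_encode_alt binary_data
instance (binary_data : List Int) (out : List Int) : Decidable (Spec_biphase_mark_encode binary_data out) := by unfold Spec_biphase_mark_encode; infer_instance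

-- ===== CLAIM (what is proved, stated in full; the proofs are below) =====
def Claim_equal_biphase_mark_encode : Prop := ∀ (binary_data : List Int), Dom_biphase_mark_encode binary_data → Spec_biphase_mark_encode binary_data (biphase_mark_encode binary_data)

-- ===== LEMMAS AND PROOFS =====

lemma pvFoldA (bits : List Int) (acc : List Int) (i s : Int) (hi : 0 ≤ i) (hs : 0 ≤ s) :
    (bits.foldl pvStepA (acc, (i + s) % 2)).1
      = acc ++ (pvFirstsAux bits i s).flatMap (fun a => [a, 1 - a]) := by
  induction bits generalizing acc i s with
  | nil => simp [pvFirstsAux]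
  | cons bit rest ih =>
    rw [List.foldl_cons]
    by_cases hb : bit = 1
    · have h1 : (1 : Int) - (i + s) % 2 = (i + (s + 1)) % 2 := by omega
      have h2 : (1 : Int) - (i + (s + 1)) % 2 = ((i + 1) + (s + 1)) % 2 := by omega
      simp only [pvStepA, hb, BEq.rfl, if_true]
      rw [h1, h2, List.append_assoc]
      rw [ih (acc ++ ([(i + (s + 1)) % 2] ++ [((i + 1) + (s + 1)) % 2])) (i + 1) (s + 1)
        (by omega) (by omega)]
      subst hb
      simp only [pvFirstsAux, BEq.rfl, if_true, List.flatMap_cons,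
        PySem.Int.mod_eq_emod_of_pos (by norm_num : (0:Int) < 2)]
      simp only [List.append_assoc, List.cons_append, List.nil_append]
      rw [← h2]
    · have hb' : (bit == 1) = false := by simp [hb]
      have h2 : (1 : Int) - (i + s) % 2 = ((i + 1) + s) % 2 := by omega
      simp only [pvStepA, hb', Bool.false_eq_true, if_false]
      rw [h2, List.append_assoc]
      rw [ih (acc ++ ([(i + s) % 2] ++ [((i + 1) + s) % 2])) (i + 1) s (by omega) hs]
      simp only [pvFirstsAux, hb', Bool.false_eq_true, if_false, List.flatMap_cons,
        PySem.Int.mod_eq_emod_of_pos (by norm_num : (0:Int) < 2)]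
      simp only [List.append_assoc, List.cons_append, List.nil_append, add_zero]
      rw [← h2]

-- ===== VERDICT (by name: the statement is the Claim_ definition above) =====
theorem biphase_mark_encode_spec : Claim_equal_biphase_mark_encode := by
  intro binary_data _
  unfold Spec_biphase_mark_encode biphase_mark_encode biphase_mark_encode_alt
  have h := pvFoldA binary_data [] 0 0 le_rfl le_rfl
  simpa using h
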